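-- pv_equiv track=rewrite | github.com/Lyoug/sticky-nim | ai.py | _move_exists
-- ===== SOURCE A (Python) =====
-- def _move_exists(config_from, config_to, max_take):
--     """Returns True if when in the situation @config_from, you can play a move
--     that removes at most @max_take sticks and gets you to the situation
--     @config_to.
--     """
--     # After a move, the number of groups can either:
--     # - remain the same
--     # - decrease by one (if you take a group’s last sticks)
--     # - increase by one (if you split a group by taking sticks in its middle)
--     if abs(len(config_from) - len(config_to)) > 1:
--         return False
--
--     # You have to take between 1 and max_take sticks per turn
--     take = sum(config_from) - sum(config_to)
--     if take < 1 or take > max_take: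
--         return False
--
--     # Since playing a move can only modify one group of the starting config,
--     # every group of config_from must be found again in config_to, except for
--     # one (the group you take sticks from).
--     c_from = config_from[:]
--     for group in config_to:
--         if group in c_from:
--             c_from.remove(group)
--     return len(c_from) == 1
-- ===== SOURCE B (Python) =====
-- def _move_exists(config_from, config_to, max_take):
--     if abs(len(config_from) - len(config_to)) > 1:
--         return False
--     take = sum(config_from) - sum(config_to)
--     if take < 1 or take > max_take:
--         return False
--     # Count each group size once, then sum per-value minima: the number of
--     # groups of config_from that are matched by a group of config_to.
--     counts_from = {}
--     for v in config_from:
--         counts_from[v] = counts_from.get(v, 0) + 1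
--     counts_to = {}
--     for v in config_to:
--         counts_to[v] = counts_to.get(v, 0) + 1
--     matched = sum(min(counts_from.get(v, 0), c) for v, c in counts_to.items())
--     return matched == len(config_from) - 1
-- ===== Notes on version B (the rewrite author's own statement) =====
-- stated objective: alternative
-- what changed: Replaces A's remove-one-occurrence loop (a linear 'in' test plus list.remove per target group) by two hash counters built in one pass each and a sum of per-value minimum counts, which equals the number of groups A's loop removes.
import Mathlib
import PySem

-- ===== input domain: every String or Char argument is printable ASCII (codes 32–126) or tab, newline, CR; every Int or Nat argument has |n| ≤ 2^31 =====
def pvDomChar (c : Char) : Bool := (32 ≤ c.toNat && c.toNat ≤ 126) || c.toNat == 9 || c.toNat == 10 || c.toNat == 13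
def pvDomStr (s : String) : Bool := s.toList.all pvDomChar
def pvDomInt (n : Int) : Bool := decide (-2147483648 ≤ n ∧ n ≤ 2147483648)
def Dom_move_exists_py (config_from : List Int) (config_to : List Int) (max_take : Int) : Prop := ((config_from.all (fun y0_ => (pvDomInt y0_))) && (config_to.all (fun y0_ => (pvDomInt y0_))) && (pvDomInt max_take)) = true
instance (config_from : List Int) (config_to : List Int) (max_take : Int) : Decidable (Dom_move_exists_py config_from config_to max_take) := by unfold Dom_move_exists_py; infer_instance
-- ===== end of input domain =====

-- B replaces A's remove-one-occurrence loop by two hash counters and a sum of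
-- per-value minimum counts (alternative algorithm, same return value).


-- ===== PORT A =====
def move_exists_py (config_from : List Int) (config_to : List Int) (max_take : Int) : Bool :=
  if |(config_from.length : Int) - (config_to.length : Int)| > 1 then false
  else
    let take := config_from.sum - config_to.sum
    if take < 1 ∨ take > max_take then false
    else
      -- for group in config_to: if group in c_from: c_from.remove(group)
      let c_from := config_to.foldl
        (fun acc group => if group ∈ acc then acc.erase group else acc) config_from
      c_from.length == 1

-- ===== PORT B =====
def move_exists_py_alt (config_from : List Int) (config_to : List Int) (max_take : Int) : Bool :=
  if |(config_from.length : Int) - (config_to.length : Int)| > 1 then false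
  else
    let take := config_from.sum - config_to.sum
    if take < 1 ∨ take > max_take then false
    else
      let counts_from : PySem.Dict Int Int :=
        config_from.foldl (fun d v => d.insert v (d.getD v 0 + 1)) PySem.Dict.empty
      let counts_to : PySem.Dict Int Int :=
        config_to.foldl (fun d v => d.insert v (d.getD v 0 + 1)) PySem.Dict.empty
      let matched := counts_to.items.foldl
        (fun s p => s + min (counts_from.getD p.1 0) p.2) 0
      matched == (config_from.length : Int) - 1

-- ===== PRECONDITION & SPEC =====
def Spec_move_exists_py (config_from : List Int) (config_to : List Int) (max_take : Int) (out : Bool) : Prop := out = move_exists_py_alt config_from config_to max_take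
instance (config_from : List Int) (config_to : List Int) (max_take : Int) (out : Bool) : Decidable (Spec_move_exists_py config_from config_to max_take out) := by unfold Spec_move_exists_py; infer_instance

-- ===== CLAIM (what is proved, stated in full; the proofs are below) =====
def Claim_equal_move_exists_py : Prop := ∀ (config_from : List Int) (config_to : List Int) (max_take : Int), Dom_move_exists_py config_from config_to max_take → Spec_move_exists_py config_from config_to max_take (move_exists_py config_from config_to max_take)

-- ===== LEMMAS AND PROOFS =====

-- A's removal loop is List.diff: the conditional erase is erase.
theorem foldA_eq_diff (ts fs : List Int) :
    ts.foldl (fun acc group => if group ∈ acc then acc.erase group else acc) fs = fs.diff ts := by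
  induction ts generalizing fs with
  | nil => rfl
  | cons t ts ih =>
    simp only [List.foldl_cons, List.diff_cons]
    by_cases h : t ∈ fs
    · rw [if_pos h]; exact ih _
    · rw [if_neg h, List.erase_of_not_mem h]; exact ih _

-- the number of matched groups, as a Finset sum of per-value minima
def matchedN (fs ts : List Int) : Nat :=
  ∑ a ∈ ts.toFinset, min (fs.count a) (ts.count a)

theorem matchedN_eq_card_inter (fs ts : List Int) :
    matchedN fs ts = Multiset.card ((fs : Multiset Int) ∩ (ts : Multiset Int)) := by
  have hf : ∀ a : Int, min (fs.count a) (ts.count a)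
      = Multiset.count a ((fs : Multiset Int) ∩ (ts : Multiset Int)) := by
    intro a; rw [Multiset.count_inter, Multiset.coe_count, Multiset.coe_count]
  have hsub : ((fs : Multiset Int) ∩ (ts : Multiset Int)).toFinset ⊆ ts.toFinset := by
    intro a ha
    rw [Multiset.mem_toFinset, Multiset.mem_inter] at ha
    rw [List.mem_toFinset]
    exact Multiset.mem_coe.mp ha.2
  have hz : ∀ a ∈ ts.toFinset, a ∉ ((fs : Multiset Int) ∩ (ts : Multiset Int)).toFinset →
      Multiset.count a ((fs : Multiset Int) ∩ (ts : Multiset Int)) = 0 := by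
    intro a _ ha
    rw [Multiset.mem_toFinset] at ha
    exact Multiset.count_eq_zero.mpr ha
  calc matchedN fs ts
      = ∑ a ∈ ts.toFinset, Multiset.count a ((fs : Multiset Int) ∩ (ts : Multiset Int)) :=
        Finset.sum_congr rfl (fun a _ => hf a)
    _ = ∑ a ∈ ((fs : Multiset Int) ∩ (ts : Multiset Int)).toFinset,
          Multiset.count a ((fs : Multiset Int) ∩ (ts : Multiset Int)) :=
        (Finset.sum_subset hsub hz).symm
    _ = Multiset.card ((fs : Multiset Int) ∩ (ts : Multiset Int)) :=
        Multiset.toFinset_sum_count_eq _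

theorem matchedN_le (fs ts : List Int) : matchedN fs ts ≤ fs.length := by
  rw [matchedN_eq_card_inter, ← Multiset.coe_card (l := fs)]
  exact Multiset.card_le_card Multiset.inter_le_left

theorem length_diff_eq (fs ts : List Int) :
    (fs.diff ts).length = fs.length - matchedN fs ts := by
  calc (fs.diff ts).length
      = Multiset.card ((fs.diff ts : List Int) : Multiset Int) := (Multiset.coe_card _).symm
    _ = Multiset.card ((fs : Multiset Int) - (ts : Multiset Int)) := by
        rw [Multiset.coe_sub]
    _ = Multiset.card ((fs : Multiset Int) - ((fs : Multiset Int) ∩ (ts : Multiset Int))) := by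
        rw [Multiset.sub_inter]
    _ = Multiset.card (fs : Multiset Int)
          - Multiset.card ((fs : Multiset Int) ∩ (ts : Multiset Int)) :=
        Multiset.card_sub Multiset.inter_le_left
    _ = fs.length - matchedN fs ts := by rw [Multiset.coe_card, matchedN_eq_card_inter]

theorem matched_eq (fs ts : List Int) :
    (PySem.Dict.counter ts).items.foldl
        (fun s p => s + min ((PySem.Dict.counter fs).getD p.1 0) p.2) 0
      = (matchedN fs ts : Int) := by
  rw [PySem.Dict.items_counter, PySem.List.foldl_add, List.map_map, zero_add]
  have h1 : ((PySem.Set.ofList ts).map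
      ((fun p : Int × Int => min ((PySem.Dict.counter fs).getD p.1 0) p.2) ∘
        (fun k => (k, (ts.count k : Int))))).sum
      = ((PySem.Set.ofList ts).map
          (fun k => ((min (fs.count k) (ts.count k) : Nat) : Int))).sum := by
    congr 1
    apply List.map_congr_left
    intro a _
    simp [PySem.Dict.getD_counter, Nat.cast_min]
  rw [h1]
  have h2 : (PySem.Set.ofList ts).toFinset = ts.toFinset := by
    apply Finset.ext
    intro a
    simp [List.mem_toFinset, PySem.Set.mem_ofList]
  rw [← List.sum_toFinset _ (PySem.Set.nodup_ofList ts), h2]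
  unfold matchedN
  push_cast
  rfl

theorem move_exists_py_spec : Claim_equal_move_exists_py := by
  intro fs ts mt _
  unfold Spec_move_exists_py move_exists_py move_exists_py_alt
  by_cases h1 : |(fs.length : Int) - (ts.length : Int)| > 1
  · simp [h1]
  · rw [if_neg h1, if_neg h1]
    by_cases h2 : fs.sum - ts.sum < 1 ∨ fs.sum - ts.sum > mt
    · simp only [h2, if_true]
    · rw [if_neg h2, if_neg h2]
      simp only [foldA_eq_diff, PySem.Dict.foldl_insert_getD_add_one_eq_counter,
        matched_eq, length_diff_eq]
      have hle := matchedN_le fs ts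
      rw [Bool.eq_iff_iff, beq_iff_eq, beq_iff_eq]
      omega
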